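-- pv_equiv track=rewrite | github.com/audibert-alexandre-fra/SIGIR | preprocessing/preprocessing.py | doc_to_sentence
-- ===== SOURCE A (Python) =====
-- def find_great_size_pad(current_length: int, max_len: int):
--     """[Return the number of neccessary padding to have
--         current_length + padding mod max_len equal to 0]
--
--     Args:
--         current_length ([int]): [original length]
--         max_len ([int]): [contraint of padding]
--
--     Returns:
--         [int]: [number of necessary padding]
--     """
--     number_padding = (current_length // max_len + 1) * (max_len) - current_length
--     return number_padding
--
-- def doc_to_sentence(data: list, max_len_sentence: int):
--     """[Each sentences are padding to attain max_en_sentence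
--     if a sentence is longer than max_en_sentence it's cut into
--     chunk of size max_en_sentence]
--
--     Args:
--         data ([list]): [List of string which have to be preprocess]
--         max_len_sentence ([int]): [maximum number of words autorize in a setence]
--
--     Returns:
--         [list]: [New dataset]
--     """
--     dataset = []
--     for text in data:
--         doc = []
--         index_start_sentence = 0
--         length_current_sentence = 0
--         index = 0
--         while(index < len(text)):
--             if text[index] == '.' or text[index] == '!' or text[index] == '?' or index == (len(text)-1):
--                 length_current_sentence = index - index_start_sentence + 1
--                 if length_current_sentence <= max_len_sentence:
--                     doc.extend(text[index_start_sentence: index + 1] +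
--                                ["<pad>"]*(max_len_sentence - length_current_sentence))
--                     index_start_sentence = index + 1
--                 else:
--                     doc.extend(text[index_start_sentence: index+1] +
--                                ["<pad>"]*find_great_size_pad(length_current_sentence, max_len_sentence))
--
--                     index_start_sentence = index + 1
--             index += 1
--         dataset.append(doc)
--     return dataset
-- ===== SOURCE B (Python) =====
-- def doc_to_sentence(data: list, max_len_sentence: int):
--     """Reverse-scan rewrite: walk each text right-to-left, accumulating the
--     current sentence (reversed) with O(1) appends; a padded sentence is flushed
--     when the token to its left is end punctuation, and the document is
--     assembled back-to-front from the collected parts."""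
--     dataset = []
--     for text in data:
--         parts = []        # padded sentences, collected right-to-left
--         cur = []          # current sentence, tokens in reverse order
--         for token in reversed(text):
--             if cur and token in ('.', '!', '?'):
--                 parts.append(_padded(cur[::-1], max_len_sentence))
--                 cur = [token]
--             else:
--                 cur.append(token)
--         if cur:
--             parts.append(_padded(cur[::-1], max_len_sentence))
--         doc = []
--         for part in reversed(parts):
--             doc.extend(part)
--         dataset.append(doc)
--     return dataset
--
--
-- def _padded(sentence, max_len_sentence):
--     n = len(sentence)
--     target = max_len_sentence if n <= max_len_sentence \
--         else (n // max_len_sentence + 1) * max_len_sentence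
--     return sentence + ["<pad>"] * (target - n)
-- ===== Notes on version B (the rewrite author's own statement) =====
-- stated objective: alternative
-- what changed: A's forward while-loop with index arithmetic and text[start:i+1] slicing is replaced by a reverse scan: each text is walked right-to-left accumulating the current sentence token-by-token (no slicing, no indices), padded sentences are flushed when the token to their left is end punctuation, and the document is assembled back-to-front from the collected parts.
import Mathlib
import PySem

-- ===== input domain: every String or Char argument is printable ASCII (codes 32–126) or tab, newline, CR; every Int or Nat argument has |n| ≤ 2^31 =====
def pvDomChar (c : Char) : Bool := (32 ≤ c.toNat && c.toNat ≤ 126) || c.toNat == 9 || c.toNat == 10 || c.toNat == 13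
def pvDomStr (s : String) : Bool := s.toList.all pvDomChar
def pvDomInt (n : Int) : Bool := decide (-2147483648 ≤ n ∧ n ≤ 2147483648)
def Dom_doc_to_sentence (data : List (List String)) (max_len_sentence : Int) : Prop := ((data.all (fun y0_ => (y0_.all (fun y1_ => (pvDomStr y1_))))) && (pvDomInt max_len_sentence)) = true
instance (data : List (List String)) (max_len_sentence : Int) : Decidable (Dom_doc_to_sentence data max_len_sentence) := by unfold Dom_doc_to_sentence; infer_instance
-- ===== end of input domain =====

-- B replaces A's forward indexed while-loop (boundary test + slicing + in-place padding)
-- by a reverse scan that accumulates the current sentence token-by-token and assembles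
-- the document back-to-front; equal return values on Pre_ (max_len_sentence = 0 with a
-- nonempty text makes both Pythons raise ZeroDivisionError).

-- ===== PORT A =====
def find_great_size_pad (current_length max_len : Int) : Int :=
  (PySem.Int.floordiv current_length max_len + 1) * max_len - current_length

-- the while-loop of A; `index` is Python's int loop counter, kept as Nat (it is always ≥ 0)
def docLoopA (text : List String) (max_len_sentence : Int)
    (doc : List String) (index_start_sentence index : Nat) : List String :=
  if h : index < text.length then
    if text[index] = "." ∨ text[index] = "!" ∨ text[index] = "?" ∨ index = text.length - 1 then
      let length_current_sentence : Int := (index : Int) - (index_start_sentence : Int) + 1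
      if length_current_sentence ≤ max_len_sentence then
        docLoopA text max_len_sentence
          (doc ++ (PySem.List.slice text (some (index_start_sentence : Int)) (some ((index : Int) + 1)) ++
            PySem.List.pyRepeat ["<pad>"] (max_len_sentence - length_current_sentence)))
          (index + 1) (index + 1)
      else
        docLoopA text max_len_sentence
          (doc ++ (PySem.List.slice text (some (index_start_sentence : Int)) (some ((index : Int) + 1)) ++
            PySem.List.pyRepeat ["<pad>"] (find_great_size_pad length_current_sentence max_len_sentence)))
          (index + 1) (index + 1)
    else
      docLoopA text max_len_sentence doc index_start_sentence (index + 1)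
  else doc
termination_by text.length - index

def doc_to_sentence (data : List (List String)) (max_len_sentence : Int) : List (List String) :=
  data.map (fun text => docLoopA text max_len_sentence [] 0 0)

-- ===== PORT B =====
-- Source B's _padded: pad a finished sentence up to its target length
def padded (sentence : List String) (max_len_sentence : Int) : List String :=
  let n : Int := sentence.length
  let target := if n ≤ max_len_sentence then max_len_sentence
                else (PySem.Int.floordiv n max_len_sentence + 1) * max_len_sentence
  sentence ++ PySem.List.pyRepeat ["<pad>"] (target - n)

-- Source B's reverse scan: state = (parts, cur); `for token in reversed(text)` is a foldl
-- over text.reverse; cur holds the current sentence in reverse order (O(1) append).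
def doc_to_sentence_alt (data : List (List String)) (max_len_sentence : Int) : List (List String) :=
  data.map (fun text =>
    let st := text.reverse.foldl
      (fun (st : List (List String) × List String) token =>
        if st.2 ≠ [] ∧ (token = "." ∨ token = "!" ∨ token = "?") then
          (st.1 ++ [padded st.2.reverse max_len_sentence], [token])
        else (st.1, st.2 ++ [token]))
      ([], [])
    let parts := if st.2 ≠ [] then st.1 ++ [padded st.2.reverse max_len_sentence] else st.1
    parts.reverse.flatten)

-- ===== PRECONDITION & SPEC =====
-- Pre_ excludes exactly the inputs on which A (and B alike) raises ZeroDivisionError: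
-- max_len_sentence = 0 together with at least one nonempty text.
def Pre_doc_to_sentence (data : List (List String)) (max_len_sentence : Int) : Prop :=
  max_len_sentence ≠ 0 ∨ ∀ text ∈ data, text = []
instance (data : List (List String)) (max_len_sentence : Int) : Decidable (Pre_doc_to_sentence data max_len_sentence) := by unfold Pre_doc_to_sentence; infer_instance
def pvWitness_doc_to_sentence : List (List String) × Int := ([["ab", "."], ["x", "y", "z"]], 2)

def Spec_doc_to_sentence (data : List (List String)) (max_len_sentence : Int) (out : List (List String)) : Prop := out = doc_to_sentence_alt data max_len_sentence
instance (data : List (List String)) (max_len_sentence : Int) (out : List (List String)) : Decidable (Spec_doc_to_sentence data max_len_sentence out) := by unfold Spec_doc_to_sentence; infer_instance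

-- ===== CLAIM (what is proved, stated in full; the proofs are below) =====
def Claim_equal_doc_to_sentence : Prop := ∀ (data : List (List String)) (max_len_sentence : Int), Dom_doc_to_sentence data max_len_sentence → Pre_doc_to_sentence data max_len_sentence → Spec_doc_to_sentence data max_len_sentence (doc_to_sentence data max_len_sentence)

-- ===== LEMMAS AND PROOFS =====

-- canonical splitter both ports are reduced to: cut after '.', '!', '?' and at the end
def splitC (acc : List String) : List String → List (List String)
  | [] => []
  | t :: ts =>
    if ts = [] then [acc ++ [t]]
    else if t = "." ∨ t = "!" ∨ t = "?" then (acc ++ [t]) :: splitC [] ts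
    else splitC (acc ++ [t]) ts

lemma splitC_nil (acc : List String) : splitC acc [] = [] := rfl

lemma splitC_cons (acc : List String) (t : String) (ts : List String) :
    splitC acc (t :: ts) =
      if ts = [] then [acc ++ [t]]
      else if t = "." ∨ t = "!" ∨ t = "?" then (acc ++ [t]) :: splitC [] ts
      else splitC (acc ++ [t]) ts := rfl

-- extending a slice by the element at its right end
lemma slice_extend (text : List String) (start index : Nat)
    (hs : start ≤ index) (hi : index < text.length) :
    PySem.List.slice text (some (start : Int)) (some ((index : Int) + 1))
      = PySem.List.slice text (some (start : Int)) (some (index : Int)) ++ [text[index]] := by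
  have h1 : ((index : Int) + 1) = (((index + 1 : Nat)) : Int) := by push_cast; ring
  rw [h1, PySem.List.slice_natCast, PySem.List.slice_natCast]
  have h2 : index + 1 - start = (index - start) + 1 := by omega
  rw [h2, List.take_add_one]
  have h3 : (text.drop start)[index - start]? = some text[index] := by
    rw [List.getElem?_drop]
    rw [List.getElem?_eq_getElem (by omega)]
    congr 1
    congr 1
    omega
  rw [h3]
  rfl

lemma length_slice_nat (text : List String) (start index : Nat)
    (hs : start ≤ index) (hi : index < text.length) :
    ((PySem.List.slice text (some (start : Int)) (some ((index : Int) + 1))).length : Int)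
      = (index : Int) - (start : Int) + 1 := by
  have : ((index : Int) + 1) = (((index + 1 : Nat)) : Int) := by push_cast; ring
  rw [this, PySem.List.slice_natCast]
  simp only [List.length_take, List.length_drop]
  omega

-- A's extend step equals Source B's padding helper applied to the finished slice
lemma pad_match (text : List String) (m : Int) (start index : Nat)
    (hs : start ≤ index) (hi : index < text.length) :
    PySem.List.slice text (some (start : Int)) (some ((index : Int) + 1)) ++
      PySem.List.pyRepeat ["<pad>"]
        (if (index : Int) - (start : Int) + 1 ≤ m then m - ((index : Int) - (start : Int) + 1)
         else find_great_size_pad ((index : Int) - (start : Int) + 1) m)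
      = padded (PySem.List.slice text (some (start : Int)) (some ((index : Int) + 1))) m := by
  unfold padded find_great_size_pad
  rw [length_slice_nat text start index hs hi]
  congr 1
  split_ifs <;> ring_nf

-- A's loop computes the padded concatenation of splitC's sentences
lemma mainA (text : List String) (m : Int) (index start : Nat) (doc : List String)
    (hs : start ≤ index) :
    docLoopA text m doc start index =
      doc ++ ((splitC (PySem.List.slice text (some (start : Int)) (some (index : Int)))
                (text.drop index)).map (fun s => padded s m)).flatten := by
  by_cases h1 : index < text.length
  · rw [List.drop_eq_getElem_cons h1, docLoopA]
    simp only [h1, dite_true]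
    have hcast : ((index : Int) + 1) = (((index + 1 : Nat)) : Int) := by push_cast; ring
    set acc := PySem.List.slice text (some (start : Int)) (some (index : Int)) with hacc
    by_cases hc : text[index] = "." ∨ text[index] = "!" ∨ text[index] = "?" ∨ index = text.length - 1
    · -- boundary: splitC emits acc ++ [t] and restarts
      have hsplit : splitC acc (text[index] :: text.drop (index + 1))
          = (acc ++ [text[index]]) :: splitC [] (text.drop (index + 1)) := by
        by_cases hts : text.drop (index + 1) = []
        · rw [hts, splitC_cons, if_pos rfl, splitC_nil]
        · have hp : text[index] = "." ∨ text[index] = "!" ∨ text[index] = "?" := by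
            rcases hc with h | h | h | h
            · exact Or.inl h
            · exact Or.inr (Or.inl h)
            · exact Or.inr (Or.inr h)
            · exfalso
              have : text.length ≤ index + 1 := by omega
              exact hts (List.drop_eq_nil_of_le this)
          rw [splitC_cons, if_neg hts, if_pos hp]
      rw [hsplit]
      have hslice : acc ++ [text[index]]
          = PySem.List.slice text (some (start : Int)) (some ((index : Int) + 1)) := by
        rw [hacc, ← slice_extend text start index hs h1]
      have hpad := pad_match text m start index hs h1
      have hnil : PySem.List.slice text (some ((index + 1 : Nat) : Int)) (some ((index + 1 : Nat) : Int))
          = [] := by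
        rw [PySem.List.slice_natCast]; simp
      by_cases h2 : (index : Int) - (start : Int) + 1 ≤ m
      · simp only [hc, if_true, h2, if_true]
        rw [mainA text m (index + 1) (index + 1) _ (le_refl _)]
        rw [if_pos h2] at hpad
        rw [hcast] at hslice hpad
        rw [hcast, hnil]
        simp only [List.map_cons, List.flatten_cons, hslice, ← hpad, List.append_assoc]
      · simp only [hc, if_true, h2, if_false]
        rw [mainA text m (index + 1) (index + 1) _ (le_refl _)]
        rw [if_neg h2] at hpad
        rw [hcast] at hslice hpad
        rw [hcast, hnil]
        simp only [List.map_cons, List.flatten_cons, hslice, ← hpad, List.append_assoc]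
    · -- not a boundary: splitC grows acc
      have hts : text.drop (index + 1) ≠ [] := by
        intro h
        exact hc (Or.inr (Or.inr (Or.inr (by
          have := List.drop_eq_nil_iff.mp h
          omega))))
      have hp : ¬ (text[index] = "." ∨ text[index] = "!" ∨ text[index] = "?") := by
        intro h
        rcases h with h | h | h
        · exact hc (Or.inl h)
        · exact hc (Or.inr (Or.inl h))
        · exact hc (Or.inr (Or.inr (Or.inl h)))
      have hsplit : splitC acc (text[index] :: text.drop (index + 1))
          = splitC (acc ++ [text[index]]) (text.drop (index + 1)) := by
        rw [splitC_cons, if_neg hts, if_neg hp]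
      rw [hsplit]
      simp only [hc, if_false]
      rw [mainA text m (index + 1) start doc (by omega)]
      have hsl : PySem.List.slice text (some ((start : Nat) : Int)) (some (((index + 1 : Nat)) : Int))
          = acc ++ [text[index]] := by
        rw [← hcast, slice_extend text start index hs h1, hacc]
      rw [hsl]
  · rw [docLoopA]
    simp only [h1, dite_false]
    rw [List.drop_eq_nil_of_le (by omega), splitC_nil]
    simp
termination_by text.length - index

-- B's reverse fold as a foldr over the original text
def stepR (m : Int) (token : String) (st : List (List String) × List String) :
    List (List String) × List String :=
  if st.2 ≠ [] ∧ (token = "." ∨ token = "!" ∨ token = "?") then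
    (st.1 ++ [padded st.2.reverse m], [token])
  else (st.1, st.2 ++ [token])

-- invariant of B's scan: cur is the (reversed) first sentence, parts the padded rest
lemma mainB (m : Int) (text : List String) (hne : text ≠ []) :
    (text.foldr (stepR m) ([], [])).2 ≠ [] ∧
    ∀ acc : List String,
      ((splitC acc text).map (fun s => padded s m)).flatten
        = padded (acc ++ (text.foldr (stepR m) ([], [])).2.reverse) m ++
            ((text.foldr (stepR m) ([], [])).1.reverse).flatten := by
  induction text with
  | nil => exact absurd rfl hne
  | cons t ts ih =>
    by_cases hts : ts = []
    · subst hts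
      constructor
      · simp [stepR]
      · intro acc
        simp [splitC_cons, stepR]
    · obtain ⟨ih1, ih2⟩ := ih hts
      rw [List.foldr_cons]
      by_cases hp : t = "." ∨ t = "!" ∨ t = "?"
      · have hstep : stepR m t (ts.foldr (stepR m) ([], []))
            = ((ts.foldr (stepR m) ([], [])).1 ++
                [padded (ts.foldr (stepR m) ([], [])).2.reverse m], [t]) := by
          unfold stepR; rw [if_pos ⟨ih1, hp⟩]
        rw [hstep]
        refine ⟨by simp, fun acc => ?_⟩
        have hsplit : splitC acc (t :: ts) = (acc ++ [t]) :: splitC [] ts := by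
          rw [splitC_cons, if_neg hts, if_pos hp]
        rw [hsplit]
        simp only [List.map_cons, List.flatten_cons, ih2 [], List.nil_append,
          List.reverse_append, List.reverse_cons, List.reverse_nil]
        simp
      · have hstep : stepR m t (ts.foldr (stepR m) ([], []))
            = ((ts.foldr (stepR m) ([], [])).1, (ts.foldr (stepR m) ([], [])).2 ++ [t]) := by
          unfold stepR
          rw [if_neg (by rintro ⟨-, h⟩; exact hp h)]
        rw [hstep]
        refine ⟨by simp, fun acc => ?_⟩
        have hsplit : splitC acc (t :: ts) = splitC (acc ++ [t]) ts := by
          rw [splitC_cons, if_neg hts, if_neg hp]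
        rw [hsplit, ih2 (acc ++ [t])]
        simp [List.append_assoc]

-- both ports agree text by text
lemma per_text (text : List String) (m : Int) :
    docLoopA text m [] 0 0 =
      (let st := text.reverse.foldl
        (fun (st : List (List String) × List String) token =>
          if st.2 ≠ [] ∧ (token = "." ∨ token = "!" ∨ token = "?") then
            (st.1 ++ [padded st.2.reverse m], [token])
          else (st.1, st.2 ++ [token]))
        ([], [])
      let parts := if st.2 ≠ [] then st.1 ++ [padded st.2.reverse m] else st.1
      parts.reverse.flatten) := by
  have hfold : text.reverse.foldl
      (fun (st : List (List String) × List String) token =>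
        if st.2 ≠ [] ∧ (token = "." ∨ token = "!" ∨ token = "?") then
          (st.1 ++ [padded st.2.reverse m], [token])
        else (st.1, st.2 ++ [token]))
      ([], []) = text.foldr (stepR m) ([], []) := by
    rw [List.foldl_reverse]
    rfl
  have hA := mainA text m 0 0 [] (le_refl 0)
  have hslice0 : PySem.List.slice text (some ((0 : Nat) : Int)) (some ((0 : Nat) : Int)) = [] := by
    rw [PySem.List.slice_natCast]; simp
  by_cases hne : text = []
  · subst hne
    rw [docLoopA]
    simp
  · obtain ⟨h1, h2⟩ := mainB m text hne
    rw [hslice0, List.drop_zero, List.nil_append] at hA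
    rw [hA, h2 []]
    simp only [hfold]
    rw [if_pos h1]
    simp

theorem doc_to_sentence_spec : Claim_equal_doc_to_sentence := by
  intro data m _ _
  unfold Spec_doc_to_sentence doc_to_sentence doc_to_sentence_alt
  exact List.map_congr_left (fun text _ => per_text text m)
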